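-- pv_equiv track=rewrite | github.com/whispr-dev/ulam-prime-spiral-3d | src/ulam-3d-wow.py | generate_cubic_shell_mapping
-- ===== SOURCE A (Python) =====
-- from typing import Dict, Iterable, List, Tuple, Optional, Set
--
-- Vec3 = Tuple[int, int, int]
--
-- def cubic_shell_points(r: int) -> Iterable[Vec3]:
--     """Points on surface max(|x|,|y|,|z|)=r, lexicographic order."""
--     if r == 0:
--         yield (0, 0, 0)
--         return
--     rng = range(-r, r + 1)
--     for x in rng:
--         for y in rng:
--             for z in rng:
--                 if max(abs(x), abs(y), abs(z)) == r:
--                     yield (x, y, z)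
--
-- def generate_cubic_shell_mapping(n: int) -> List[Vec3]:
--     coords: List[Vec3] = []
--     r = 0
--     while len(coords) < n:
--         for p in cubic_shell_points(r):
--             coords.append(p)
--             if len(coords) >= n:
--                 break
--         r += 1
--     return coords
-- ===== SOURCE B (Python) =====
-- from typing import List, Tuple
--
-- Vec3 = Tuple[int, int, int]
--
-- def _shell(r: int) -> List[Vec3]:
--     """Surface points max(|x|,|y|,|z|)=r in lexicographic order, emitted directly (no cube scan)."""
--     if r == 0:
--         return [(0, 0, 0)]
--     pts: List[Vec3] = []
--     full = range(-r, r + 1)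
--     inner = range(-r + 1, r)
--     for y in full:                      # x = -r face
--         for z in full:
--             pts.append((-r, y, z))
--     for x in inner:                     # ring at each interior x
--         for z in full:
--             pts.append((x, -r, z))
--         for y in inner:
--             pts.append((x, y, -r))
--             pts.append((x, y, r))
--         for z in full:
--             pts.append((x, r, z))
--     for y in full:                      # x = r face
--         for z in full:
--             pts.append((r, y, z))
--     return pts
--
-- def generate_cubic_shell_mapping(n: int) -> List[Vec3]:
--     coords: List[Vec3] = []
--     r = 0
--     while len(coords) < n:
--         coords.extend(_shell(r))
--         r += 1
--     return coords[:n]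
-- ===== Notes on version B (the rewrite author's own statement) =====
-- stated objective: faster
-- what changed: B generates each shell's O(r^2) surface points directly (two full faces plus per-x boundary rings) instead of scanning the whole (2r+1)^3 cube and filtering by max(|x|,|y|,|z|)==r, and truncates whole shells with a final slice instead of a per-point append-and-break loop.
import Mathlib
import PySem

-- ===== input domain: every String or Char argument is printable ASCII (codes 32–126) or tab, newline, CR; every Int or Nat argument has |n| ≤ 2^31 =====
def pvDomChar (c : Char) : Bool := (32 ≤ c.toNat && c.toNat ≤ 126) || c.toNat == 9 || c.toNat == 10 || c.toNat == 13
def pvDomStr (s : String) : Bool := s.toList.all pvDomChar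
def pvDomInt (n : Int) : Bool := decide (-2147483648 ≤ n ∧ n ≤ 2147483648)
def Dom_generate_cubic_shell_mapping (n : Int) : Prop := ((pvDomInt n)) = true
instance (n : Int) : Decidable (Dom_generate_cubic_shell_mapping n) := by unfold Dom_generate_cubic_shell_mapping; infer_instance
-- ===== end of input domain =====

-- B replaces A's O(r^3) interior cube scan per shell by emitting the O(r^2) surface points
-- directly and truncating whole shells with a slice; objective: faster (asymptotic).

-- ===== PORT A =====

-- cubic_shell_points: triple loop over range(-r, r+1) filtered by max(|x|,|y|,|z|) == r
def pvShellA (r : Int) : List (Int × Int × Int) :=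
  if r = 0 then [(0, 0, 0)]
  else
    (PySem.List.pyRange (-r) (r+1) 1).flatMap (fun x =>
      (PySem.List.pyRange (-r) (r+1) 1).flatMap (fun y =>
        ((PySem.List.pyRange (-r) (r+1) 1).filter
            (fun z => max (max |x| |y|) |z| == r)).map (fun z => (x, y, z))))

-- the inner `for p in cubic_shell_points(r): coords.append(p); if len(coords) >= n: break`
def pvLoopAInner (n : Int) (coords : List (Int × Int × Int)) (pts : List (Int × Int × Int)) :
    List (Int × Int × Int) :=
  match pts with
  | [] => coords
  | p :: rest =>
      let c := coords ++ [p]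
      if n ≤ (c.length : Int) then c else pvLoopAInner n c rest

-- termination facts for the while-loop (each pass appends at least one point)
theorem pvShellA_ne_nil' (s : Int) (hs : 1 ≤ s) : pvShellA s ≠ [] := by
  unfold pvShellA
  rw [if_neg (by omega)]
  have habs : |(-s)| = s := by rw [abs_neg, abs_of_nonneg (by omega)]
  have hm1 : -s ∈ PySem.List.pyRange (-s) (s+1) 1 :=
    PySem.List.mem_pyRange_one.mpr ⟨le_refl _, by omega⟩
  apply List.ne_nil_of_mem (a := (-s, -s, -s))
  rw [List.mem_flatMap]
  refine ⟨-s, hm1, ?_⟩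
  rw [List.mem_flatMap]
  refine ⟨-s, hm1, ?_⟩
  rw [List.mem_map]
  exact ⟨-s, List.mem_filter.mpr ⟨hm1, by simp [habs]⟩, rfl⟩

theorem pvShellA_ne_nil (r : Nat) : pvShellA (r : Int) ≠ [] := by
  rcases Nat.eq_zero_or_pos r with h | h
  · subst h; unfold pvShellA; simp
  · exact pvShellA_ne_nil' _ (by exact_mod_cast h)

theorem pvLoopAInner_len_lt (n : Int) (coords pts : List (Int × Int × Int))
    (h : (coords.length : Int) < n) (hp : pts ≠ []) :
    coords.length < (pvLoopAInner n coords pts).length := by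
  induction pts generalizing coords with
  | nil => exact absurd rfl hp
  | cons p rest ih =>
      unfold pvLoopAInner
      by_cases hb : n ≤ (((coords ++ [p]).length : Nat) : Int)
      · rw [if_pos hb]; simp
      · rw [if_neg hb]
        have hlt : (((coords ++ [p]).length : Nat) : Int) < n := by push_cast at hb ⊢; omega
        cases rest with
        | nil => unfold pvLoopAInner; simp
        | cons q t =>
            calc coords.length < (coords ++ [p]).length := by simp
              _ < _ := ih (coords ++ [p]) hlt (by simp)

def pvLoopA (n : Int) (coords : List (Int × Int × Int)) (r : Nat) : List (Int × Int × Int) :=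
  if h : (coords.length : Int) < n then
    pvLoopA n (pvLoopAInner n coords (pvShellA (r : Int))) (r + 1)
  else coords
termination_by (n - coords.length).toNat
decreasing_by
  have := pvLoopAInner_len_lt n coords (pvShellA (r : Int)) h (pvShellA_ne_nil r)
  omega

def generate_cubic_shell_mapping (n : Int) : List (Int × Int × Int) :=
  pvLoopA n [] 0

-- ===== PORT B =====

-- _shell: faces at x = ±r in full, rings (y = ±r rows and z = ±r pairs) at interior x
def pvShellB (r : Int) : List (Int × Int × Int) :=
  if r = 0 then [(0, 0, 0)]
  else
    ((PySem.List.pyRange (-r) (r+1) 1).flatMap (fun y =>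
        (PySem.List.pyRange (-r) (r+1) 1).map (fun z => (-r, y, z))))
    ++ ((PySem.List.pyRange (-r+1) r 1).flatMap (fun x =>
          ((PySem.List.pyRange (-r) (r+1) 1).map (fun z => (x, -r, z)))
          ++ ((PySem.List.pyRange (-r+1) r 1).flatMap (fun y => [(x, y, -r), (x, y, r)]))
          ++ ((PySem.List.pyRange (-r) (r+1) 1).map (fun z => (x, r, z)))))
    ++ ((PySem.List.pyRange (-r) (r+1) 1).flatMap (fun y =>
        (PySem.List.pyRange (-r) (r+1) 1).map (fun z => (r, y, z))))

theorem pvShellB_ne_nil' (s : Int) (hs : 1 ≤ s) : pvShellB s ≠ [] := by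
  unfold pvShellB
  rw [if_neg (by omega)]
  have hm1 : -s ∈ PySem.List.pyRange (-s) (s+1) 1 :=
    PySem.List.mem_pyRange_one.mpr ⟨le_refl _, by omega⟩
  apply List.ne_nil_of_mem (a := (-s, -s, -s))
  rw [List.mem_append]
  left
  rw [List.mem_append]
  left
  rw [List.mem_flatMap]
  refine ⟨-s, hm1, ?_⟩
  rw [List.mem_map]
  exact ⟨-s, hm1, rfl⟩

theorem pvShellB_ne_nil (r : Nat) : pvShellB (r : Int) ≠ [] := by
  rcases Nat.eq_zero_or_pos r with h | h
  · subst h; unfold pvShellB; simp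
  · exact pvShellB_ne_nil' _ (by exact_mod_cast h)

def pvLoopB (n : Int) (coords : List (Int × Int × Int)) (r : Nat) : List (Int × Int × Int) :=
  if h : (coords.length : Int) < n then
    pvLoopB n (coords ++ pvShellB (r : Int)) (r + 1)
  else coords
termination_by (n - coords.length).toNat
decreasing_by
  have hne := pvShellB_ne_nil r
  have : 0 < (pvShellB (r : Int)).length := List.length_pos_iff.mpr hne
  simp only [List.length_append]
  omega

def generate_cubic_shell_mapping_alt (n : Int) : List (Int × Int × Int) :=
  PySem.List.slice (pvLoopB n [] 0) none (some n)

-- ===== PRECONDITION & SPEC =====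
def Spec_generate_cubic_shell_mapping (n : Int) (out : List (Int × Int × Int)) : Prop := out = generate_cubic_shell_mapping_alt n
instance (n : Int) (out : List (Int × Int × Int)) : Decidable (Spec_generate_cubic_shell_mapping n out) := by unfold Spec_generate_cubic_shell_mapping; infer_instance

-- ===== CLAIM (what is proved, stated in full; the proofs are below) =====
def Claim_equal_generate_cubic_shell_mapping : Prop := ∀ (n : Int), Dom_generate_cubic_shell_mapping n → Spec_generate_cubic_shell_mapping n (generate_cubic_shell_mapping n)

-- ===== LEMMAS AND PROOFS =====

theorem pv_flatMap_congr {α β : Type} {l : List α} {f g : α → List β}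
    (h : ∀ a ∈ l, f a = g a) : l.flatMap f = l.flatMap g := by
  induction l with
  | nil => rfl
  | cons a t ih =>
      simp only [List.flatMap_cons]
      rw [h a (by simp), ih (fun a ha => h a (by simp [ha]))]

theorem pv_full_decomp (r : Int) (hr : 1 ≤ r) :
    PySem.List.pyRange (-r) (r+1) 1
      = -r :: (PySem.List.pyRange (-r+1) r 1 ++ [r]) := by
  rw [PySem.List.pyRange_one_cons (by omega), PySem.List.pyRange_one_succ_right (by omega)]

theorem pv_abs_le {r v : Int} (hv : v ∈ PySem.List.pyRange (-r) (r+1) 1) : |v| ≤ r := by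
  rw [PySem.List.mem_pyRange_one] at hv
  rw [abs_le]
  omega

theorem pv_filter_full (r x y : Int) (hxy : max |x| |y| = r) :
    (PySem.List.pyRange (-r) (r+1) 1).filter (fun z => max (max |x| |y|) |z| == r)
      = PySem.List.pyRange (-r) (r+1) 1 := by
  apply List.filter_eq_self.mpr
  intro z hz
  simp only [beq_iff_eq, hxy]
  exact max_eq_left (pv_abs_le hz)

theorem pv_filter_ends (r x y : Int) (hr : 1 ≤ r) (hx : |x| ≤ r - 1) (hy : |y| ≤ r - 1) :
    (PySem.List.pyRange (-r) (r+1) 1).filter (fun z => max (max |x| |y|) |z| == r) = [-r, r] := by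
  have habs : |(-r)| = r := by rw [abs_neg, abs_of_nonneg (by omega)]
  have h1 : (max (max |x| |y|) |(-r)| == r) = true := by
    simp only [beq_iff_eq, habs]
    exact max_eq_right (by have := max_le hx hy; omega)
  have h2 : (max (max |x| |y|) |r| == r) = true := by
    simp only [beq_iff_eq, abs_of_nonneg (by omega : (0:Int) ≤ r)]
    exact max_eq_right (by have := max_le hx hy; omega)
  have h3 : (PySem.List.pyRange (-r+1) r 1).filter (fun z => max (max |x| |y|) |z| == r) = [] := by
    apply List.filter_eq_nil_iff.mpr
    intro z hz
    rw [PySem.List.mem_pyRange_one] at hz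
    have hz' : |z| ≤ r - 1 := by rw [abs_le]; omega
    simp only [beq_iff_eq]
    have := max_le (max_le hx hy) hz'
    omega
  rw [pv_full_decomp r hr]
  simp only [List.filter_cons, List.filter_append, h1, h3, h2, if_true, List.nil_append,
    List.filter_nil]

theorem pv_shell_eq (r : Int) (hr : 0 ≤ r) : pvShellA r = pvShellB r := by
  by_cases h0 : r = 0
  · subst h0; rfl
  · have hr1 : 1 ≤ r := by omega
    have habs : |(-r)| = r := by rw [abs_neg, abs_of_nonneg hr]
    have habsr : |r| = r := abs_of_nonneg hr
    have hsplit : ∀ (f : Int → List (Int × Int × Int)),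
        (PySem.List.pyRange (-r) (r+1) 1).flatMap f
          = f (-r) ++ ((PySem.List.pyRange (-r+1) r 1).flatMap f ++ f r) := by
      intro f
      rw [pv_full_decomp r hr1]
      simp
    unfold pvShellA pvShellB
    rw [if_neg h0, if_neg h0]
    rw [hsplit]
    simp only [List.append_assoc]
    congr 1
    · -- face x = -r
      apply pv_flatMap_congr
      intro y hy
      rw [pv_filter_full r (-r) y (by rw [habs]; exact max_eq_left (pv_abs_le hy))]
    congr 1
    · -- interior rings
      apply pv_flatMap_congr
      intro x hx
      have hxb : |x| ≤ r - 1 := by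
        rw [PySem.List.mem_pyRange_one] at hx
        rw [abs_le]
        omega
      rw [hsplit]
      congr 1
      · rw [pv_filter_full r x (-r) (by rw [habs]; exact max_eq_right (by omega))]
      congr 1
      · apply pv_flatMap_congr
        intro y hy
        have hyb : |y| ≤ r - 1 := by
          rw [PySem.List.mem_pyRange_one] at hy
          rw [abs_le]
          omega
        rw [pv_filter_ends r x y hr1 hxb hyb]
        rfl
      · rw [pv_filter_full r x r (by rw [habsr]; exact max_eq_right (by omega))]
    · -- face x = r
      apply pv_flatMap_congr
      intro y hy
      rw [pv_filter_full r r y (by rw [habsr]; exact max_eq_left (pv_abs_le hy))]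

theorem pvLoopAInner_spec (n : Int) (coords pts : List (Int × Int × Int))
    (h : (coords.length : Int) < n) :
    pvLoopAInner n coords pts = coords ++ pts.take (n - coords.length).toNat := by
  induction pts generalizing coords with
  | nil => simp [pvLoopAInner]
  | cons p rest ih =>
      unfold pvLoopAInner
      by_cases hb : n ≤ (((coords ++ [p]).length : Nat) : Int)
      · rw [if_pos hb]
        have hk : (n - coords.length).toNat = 1 := by
          simp only [List.length_append, List.length_cons, List.length_nil] at hb
          push_cast at hb ⊢
          omega
        rw [hk]
        simp
      · rw [if_neg hb]
        rw [ih _ (by simp only [List.length_append, List.length_cons, List.length_nil] at hb ⊢; push_cast at hb ⊢; omega)]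
        have hk : (n - coords.length).toNat = (n - ((coords ++ [p]).length : Nat)).toNat + 1 := by
          simp only [List.length_append, List.length_cons, List.length_nil] at hb ⊢
          push_cast at hb ⊢
          omega
        rw [hk, List.take_succ_cons, ← List.append_cons]

theorem pv_loop_eq (n : Int) (m : Nat) :
    ∀ (coords : List (Int × Int × Int)) (r : Nat),
      (n - coords.length).toNat ≤ m → (coords.length : Int) < n →
      pvLoopA n coords r = (pvLoopB n coords r).take n.toNat := by
  induction m with
  | zero =>
      intro coords r hm h
      exfalso
      omega
  | succ m ih =>
      intro coords r hm h
      rw [pvLoopA, pvLoopB, dif_pos h, dif_pos h]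
      rw [pvLoopAInner_spec n coords _ h, ← pv_shell_eq (r : Int) (by positivity)]
      set s := pvShellA (r : Int) with hs
      set k := (n - coords.length).toNat with hk
      have hs1 : 1 ≤ s.length := List.length_pos_iff.mpr (pvShellA_ne_nil r)
      by_cases hsk : s.length < k
      · rw [List.take_of_length_le (le_of_lt hsk)]
        apply ih (coords ++ s) (r + 1)
        · simp only [List.length_append]
          omega
        · simp only [List.length_append]
          push_cast
          omega
      · have hlen : (coords ++ s.take k).length = coords.length + k := by
          simp [List.length_take]
          omega
        rw [pvLoopA, dif_neg (by rw [hlen]; push_cast; omega)]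
        rw [pvLoopB, dif_neg (by simp only [List.length_append]; push_cast; omega)]
        have hn : n.toNat = coords.length + k := by omega
        rw [hn, List.take_append, List.take_of_length_le (by omega : coords.length ≤ coords.length + k)]
        have hkk : coords.length + k - coords.length = k := by omega
        rw [hkk]

-- ===== VERDICT (by name: the statement is the Claim_ definition above) =====
theorem generate_cubic_shell_mapping_spec : Claim_equal_generate_cubic_shell_mapping := by
  intro n _
  unfold Spec_generate_cubic_shell_mapping generate_cubic_shell_mapping generate_cubic_shell_mapping_alt
  by_cases hn : 0 < n
  · rw [PySem.List.slice_to _ (le_of_lt hn)]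
    exact pv_loop_eq n (n.toNat) [] 0 (by simp) (by simpa using hn)
  · rw [pvLoopA, pvLoopB]
    simp only [List.length_nil, Int.natCast_zero, dif_neg (by omega : ¬ ((0:Int) < n))]
    simp [PySem.List.slice]
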